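-- pv_equiv track=rewrite | github.com/jaimeliew1/Advent-of-Code-2025 | src/advent_of_code_2025/day06.py | solve
-- ===== SOURCE A (Python) =====
-- import math
--
-- def solve(lines, numbers, ops) -> tuple[int, int]:
--     ans1, ans2 = 0, 0
--     for nums, op in zip(numbers, ops):
--         ans1 += sum(nums) if op == "+" else math.prod(nums)
--
--     ops_gen = iter(ops)
--     op = next(ops_gen)
--     temp_ans = 0 if op == "+" else 1
--     for nums in list(zip(*lines))[:-1]:
--         if all(n == " " for n in nums):
--             op, ans2 = next(ops_gen), ans2 + temp_ans
--             temp_ans = 0 if op == "+" else 1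
--         elif op == "+":
--             temp_ans += int("".join(nums))
--         else:
--             temp_ans *= int("".join(nums))
--
--     return ans1, ans2 + temp_ans
-- ===== SOURCE B (Python) =====
-- import math
--
--
-- def solve(lines, numbers, ops):
--     ans1 = sum(sum(nums) if op == "+" else math.prod(nums)
--                for nums, op in zip(numbers, ops))
--
--     # transpose once, drop the last column, split into segments at all-space
--     # columns, then aggregate each segment with its op by index
--     cols = list(zip(*lines))[:-1]
--     segs = []
--     cur = []
--     for col in cols:
--         if all(c == " " for c in col):
--             segs.append(cur)
--             cur = []
--         else:
--             cur.append(int("".join(col)))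
--     segs.append(cur)
--
--     ans2 = 0
--     for i, seg in enumerate(segs):
--         ans2 += sum(seg) if ops[i] == "+" else math.prod(seg)
--     return ans1, ans2
-- ===== Notes on version B (the rewrite author's own statement) =====
-- stated objective: alternative
-- what changed: Replaces A's single stateful column walk (carrying the current op, a running temp accumulator and a live ops iterator) by a two-phase pipeline: first split the transposed columns into segments at all-space columns, then aggregate each segment with its op looked up by index.
import Mathlib
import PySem

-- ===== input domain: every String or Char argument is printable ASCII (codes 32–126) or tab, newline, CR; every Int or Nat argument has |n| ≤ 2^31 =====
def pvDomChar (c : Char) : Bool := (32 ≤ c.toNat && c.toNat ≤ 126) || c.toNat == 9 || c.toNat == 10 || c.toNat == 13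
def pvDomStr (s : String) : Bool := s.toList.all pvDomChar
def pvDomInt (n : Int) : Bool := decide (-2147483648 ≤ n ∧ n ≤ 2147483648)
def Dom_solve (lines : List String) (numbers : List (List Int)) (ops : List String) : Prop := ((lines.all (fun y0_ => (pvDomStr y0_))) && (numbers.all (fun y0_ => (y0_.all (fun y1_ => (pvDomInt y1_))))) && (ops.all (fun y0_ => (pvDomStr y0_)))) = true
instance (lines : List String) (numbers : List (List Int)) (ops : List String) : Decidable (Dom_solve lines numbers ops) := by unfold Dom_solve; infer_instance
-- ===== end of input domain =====

-- B replaces A's single stateful column walk (current op + running accumulator + live ops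
-- iterator) by a two-phase pipeline: split the columns into segments at all-space columns,
-- then aggregate each segment with its op looked up by index (objective: alternative).

-- shared helper: list(zip(*lines)) — character columns, truncated to the shortest line
def pyColumns (lines : List String) : List (List Char) :=
  match lines.map String.toList with
  | [] => []
  | l :: ls =>
    let n := ls.foldl (fun m t => min m t.length) l.length
    (List.range n).map (fun i => (l :: ls).map (fun t => t.getD i ' '))

-- ===== PORT A =====
-- loop body of A's ans2 pass, state (op, ans2, temp_ans, remaining ops iterator)
def stepA (st : String × Int × Int × List String) (col : List Char) :
    String × Int × Int × List String :=
  let (op, ans2, temp, og) := st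
  if col.all (· = ' ') then
    match og with
    | [] => st          -- next(ops_gen) raises StopIteration here: excluded by Pre_solve
    | op' :: og' => (op', ans2 + temp, if op' = "+" then 0 else 1, og')
  else if op = "+" then
    (op, ans2, temp + (PySem.Int.ofChars? col).getD 0, og)   -- none = ValueError: excluded by Pre_solve
  else
    (op, ans2, temp * (PySem.Int.ofChars? col).getD 0, og)

def solve (lines : List String) (numbers : List (List Int)) (ops : List String) : Int × Int :=
  let ans1 := (numbers.zip ops).foldl
    (fun a p => a + (if p.2 = "+" then p.1.sum else p.1.prod)) 0
  match ops with
  | [] => (ans1, 0)     -- next(iter([])) raises StopIteration: excluded by Pre_solve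
  | op0 :: rest =>
    let cols := pyColumns lines
    let st := (cols.take (cols.length - 1)).foldl stepA
      (op0, 0, (if op0 = "+" then (0 : Int) else 1), rest)
    (ans1, st.2.1 + st.2.2.1)

-- ===== PORT B =====
-- loop body of B's segment-building pass, state (finished segments, current segment)
def stepB (sc : List (List Int) × List Int) (col : List Char) :
    List (List Int) × List Int :=
  if col.all (· = ' ') then (sc.1 ++ [sc.2], [])
  else (sc.1, sc.2 ++ [(PySem.Int.ofChars? col).getD 0])     -- none = ValueError: excluded by Pre_solve

def solve_alt (lines : List String) (numbers : List (List Int)) (ops : List String) : Int × Int :=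
  let ans1 := ((numbers.zip ops).map (fun p => if p.2 = "+" then p.1.sum else p.1.prod)).sum
  let cols := pyColumns lines
  let sc := (cols.take (cols.length - 1)).foldl stepB ([], [])
  let segs := sc.1 ++ [sc.2]
  let ans2 := (PySem.List.enumerate segs).foldl
    (fun a p => a + (if PySem.List.pyGetD ops p.1 "" = "+" then p.2.sum else p.2.prod)) 0
  (ans1, ans2)

-- ===== PRECONDITION & SPEC =====
-- Pre_solve is exactly A's return domain: ops nonempty, enough ops for every all-space
-- separator column encountered (else next() raises StopIteration), and every non-separator
-- column (last column dropped) parses as an int (else int() raises ValueError).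
def Pre_solve (lines : List String) (numbers : List (List Int)) (ops : List String) : Prop :=
  ops ≠ [] ∧
  ((pyColumns lines).take ((pyColumns lines).length - 1)).countP (fun col => col.all (· = ' ')) + 1 ≤ ops.length ∧
  ∀ col ∈ (pyColumns lines).take ((pyColumns lines).length - 1),
    col.all (· = ' ') = false → (PySem.Int.ofChars? col).isSome
instance (lines : List String) (numbers : List (List Int)) (ops : List String) : Decidable (Pre_solve lines numbers ops) := by unfold Pre_solve; infer_instance

def pvWitness_solve : List String × List (List Int) × List String :=
  (["1 2x", "3 4x"], [[1, 2], [3]], ["+", "*"])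

def Spec_solve (lines : List String) (numbers : List (List Int)) (ops : List String) (out : Int × Int) : Prop := out = solve_alt lines numbers ops
instance (lines : List String) (numbers : List (List Int)) (ops : List String) (out : Int × Int) : Decidable (Spec_solve lines numbers ops out) := by unfold Spec_solve; infer_instance

-- ===== CLAIM (what is proved, stated in full; the proofs are below) =====
def Claim_equal_solve : Prop := ∀ (lines : List String) (numbers : List (List Int)) (ops : List String), Dom_solve lines numbers ops → Pre_solve lines numbers ops → Spec_solve lines numbers ops (solve lines numbers ops)

-- ===== LEMMAS AND PROOFS =====

-- the value a segment contributes under an op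
def evalSeg (op : String) (g : List Int) : Int := if op = "+" then g.sum else g.prod

-- B's indexed aggregation, written recursively from position s
def esum (ops : List String) : Nat → List (List Int) → Int
  | _, [] => 0
  | s, g :: gs => evalSeg (ops.getD s "") g + esum ops (s + 1) gs

lemma foldl_add_map {α : Type} (f : α → Int) :
    ∀ (l : List α) (a : Int), l.foldl (fun a p => a + f p) a = a + (l.map f).sum
  | [], a => by simp
  | x :: l, a => by
    simp [List.foldl_cons, foldl_add_map f l]; ring

lemma foldl_enum (ops : List String) :
    ∀ (segs : List (List Int)) (s : Nat) (a : Int),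
      (PySem.List.enumerate segs (s : Int)).foldl
        (fun a p => a + (if PySem.List.pyGetD ops p.1 "" = "+" then p.2.sum else p.2.prod)) a
      = a + esum ops s segs
  | [], s, a => by simp [PySem.List.enumerate, esum]
  | g :: gs, s, a => by
    have : (s : Int) + 1 = ((s + 1 : Nat) : Int) := by push_cast; ring
    rw [PySem.List.enumerate_cons, List.foldl_cons, this, foldl_enum ops gs (s + 1)]
    simp [esum, evalSeg, PySem.List.pyGetD_natCast]
    split <;> ring

lemma esum_append_single (ops : List String) :
    ∀ (segs : List (List Int)) (s : Nat) (cur : List Int),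
      esum ops s (segs ++ [cur]) = esum ops s segs + evalSeg (ops.getD (s + segs.length) "") cur
  | [], s, cur => by simp [esum]
  | g :: gs, s, cur => by
    simp only [List.cons_append, esum, esum_append_single ops gs (s + 1) cur, List.length_cons]
    have : s + 1 + gs.length = s + (gs.length + 1) := by omega
    rw [this]; ring

-- stepB only ever appends to the finished-segments list
lemma stepB_prefix :
    ∀ (cols : List (List Char)) (segs : List (List Int)) (cur : List Int),
      cols.foldl stepB (segs, cur)
        = (segs ++ (cols.foldl stepB ([], cur)).1, (cols.foldl stepB ([], cur)).2)
  | [], segs, cur => by simp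
  | col :: cols, segs, cur => by
    by_cases h : col.all (· = ' ')
    · simp only [List.foldl_cons, stepB, h, if_pos, List.nil_append]
      rw [stepB_prefix cols (segs ++ [cur]) [], stepB_prefix cols [cur] []]
      simp
    · simp only [List.foldl_cons, stepB, h, if_neg]
      exact stepB_prefix cols segs (cur ++ [(PySem.Int.ofChars? col).getD 0])

lemma evalSeg_append (op : String) (cur : List Int) (v : Int) :
    evalSeg op (cur ++ [v]) = if op = "+" then evalSeg op cur + v else evalSeg op cur * v := by
  unfold evalSeg; split <;> simp

-- main loop invariant: A's walk from position k equals B's segments aggregated from k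
lemma main_loop :
    ∀ (cols : List (List Char)) (ops : List String) (k : Nat) (a2 : Int) (cur : List Int),
      k + 1 + cols.countP (fun col => col.all (· = ' ')) ≤ ops.length →
      (cols.foldl stepA (ops.getD k "", a2, evalSeg (ops.getD k "") cur, ops.drop (k + 1))).2.1
        + (cols.foldl stepA (ops.getD k "", a2, evalSeg (ops.getD k "") cur, ops.drop (k + 1))).2.2.1
      = a2 + esum ops k ((cols.foldl stepB ([], cur)).1 ++ [(cols.foldl stepB ([], cur)).2])
  | [], ops, k, a2, cur => by
    simp [esum, evalSeg]
  | col :: cols, ops, k, a2, cur => by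
    intro hsep
    by_cases h : col.all (· = ' ')
    · have hc : (col :: cols).countP (fun col => col.all (· = ' '))
          = cols.countP (fun col => col.all (· = ' ')) + 1 := by
        simp [List.countP_cons, h]
      have hk1 : k + 1 < ops.length := by omega
      have hdrop : ops.drop (k + 1) = ops[k + 1] :: ops.drop (k + 2) :=
        List.drop_eq_getElem_cons hk1
      have hget : ops.getD (k + 1) "" = ops[k + 1] := List.getD_eq_getElem ops "" hk1
      have hid : (if ops[k + 1] = "+" then (0 : Int) else 1)
          = evalSeg (ops.getD (k + 1) "") [] := by
        rw [hget]; unfold evalSeg; split <;> simp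
      simp only [List.foldl_cons, stepA, stepB, h, if_pos, List.nil_append, hdrop]
      rw [hid, ← hget]
      have ih := main_loop cols ops (k + 1) (a2 + evalSeg (ops.getD k "") cur) []
        (by omega)
      rw [ih]
      rw [stepB_prefix cols [cur] []]
      simp [esum]
      ring
    · have hc : (col :: cols).countP (fun col => col.all (· = ' '))
          = cols.countP (fun col => col.all (· = ' ')) := by
        simp [List.countP_cons, h]
      simp only [List.foldl_cons, stepA, stepB, h, if_neg]
      have harith : (if ops.getD k "" = "+"
            then (ops.getD k "", a2, evalSeg (ops.getD k "") cur + (PySem.Int.ofChars? col).getD 0, ops.drop (k + 1))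
            else (ops.getD k "", a2, evalSeg (ops.getD k "") cur * (PySem.Int.ofChars? col).getD 0, ops.drop (k + 1)))
          = (ops.getD k "", a2, evalSeg (ops.getD k "") (cur ++ [(PySem.Int.ofChars? col).getD 0]), ops.drop (k + 1)) := by
        rw [evalSeg_append]; split <;> simp
      rw [harith]
      exact main_loop cols ops k a2 (cur ++ [(PySem.Int.ofChars? col).getD 0]) (by omega)

-- ===== VERDICT (by name: the statement is the Claim_ definition above) =====
theorem solve_spec : Claim_equal_solve := by
  intro lines numbers ops _ hpre
  obtain ⟨hne, hlen, _⟩ := hpre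
  cases ops with
  | nil => exact absurd rfl hne
  | cons op0 rest =>
    unfold Spec_solve solve solve_alt
    simp only []
    have h1 : ((op0 :: rest : List String).getD 0 "") = op0 := rfl
    have h2 : ((op0 :: rest : List String).drop 1) = rest := rfl
    have h3 : (if op0 = "+" then (0 : Int) else 1) = evalSeg op0 [] := by
      unfold evalSeg; split <;> simp
    have hml := main_loop ((pyColumns lines).take ((pyColumns lines).length - 1))
      (op0 :: rest) 0 0 [] (by omega)
    rw [h1, h2] at hml
    have he : ((0 : Int)) = ((0 : Nat) : Int) := by norm_num
    rw [Prod.mk.injEq]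
    refine ⟨?_, ?_⟩
    · rw [foldl_add_map]; ring
    · rw [h3, hml, he, foldl_enum]
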